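-- pv_equiv track=rewrite | github.com/satishk01/kiro-opensource-code | services/mcp_service.py | _categorize_aws_components
-- ===== SOURCE A (Python) =====
-- from typing import Dict, List, Optional, Any
--
-- def _categorize_aws_components(components: List[str]) -> Dict[str, List[str]]:
--     """Categorize AWS components by service type"""
--     categories = {
--         'compute': [],
--         'storage': [],
--         'database': [],
--         'network': [],
--         'security': [],
--         'monitoring': [],
--         'integration': [],
--         'analytics': []
--     }
--
--     service_categories = {
--         'compute': ['EC2', 'Lambda', 'ECS', 'EKS', 'Fargate'],
--         'storage': ['S3', 'EFS', 'EBS'],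
--         'database': ['RDS', 'DynamoDB', 'Aurora', 'ElastiCache', 'Redshift'],
--         'network': ['VPC', 'CloudFront', 'Route 53', 'ALB', 'NLB', 'ELB', 'API Gateway', 'WAF'],
--         'security': ['IAM', 'Cognito', 'KMS', 'Secrets Manager'],
--         'monitoring': ['CloudWatch', 'CloudTrail', 'X-Ray'],
--         'integration': ['SQS', 'SNS', 'EventBridge', 'Kinesis', 'Step Functions'],
--         'analytics': ['Redshift', 'Kinesis', 'QuickSight', 'Athena']
--     }
--
--     for component in components:
--         categorized = False
--         for category, services in service_categories.items():
--             if component in services: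
--                 categories[category].append(component)
--                 categorized = True
--                 break
--
--         if not categorized:
--             categories['compute'].append(component)  # Default to compute
--
--     return categories
-- ===== SOURCE B (Python) =====
-- from typing import Dict, List
--
-- _SERVICE_CATEGORIES = {
--     'compute': ['EC2', 'Lambda', 'ECS', 'EKS', 'Fargate'],
--     'storage': ['S3', 'EFS', 'EBS'],
--     'database': ['RDS', 'DynamoDB', 'Aurora', 'ElastiCache', 'Redshift'],
--     'network': ['VPC', 'CloudFront', 'Route 53', 'ALB', 'NLB', 'ELB', 'API Gateway', 'WAF'],
--     'security': ['IAM', 'Cognito', 'KMS', 'Secrets Manager'],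
--     'monitoring': ['CloudWatch', 'CloudTrail', 'X-Ray'],
--     'integration': ['SQS', 'SNS', 'EventBridge', 'Kinesis', 'Step Functions'],
--     'analytics': ['Redshift', 'Kinesis', 'QuickSight', 'Athena']
-- }
--
--
-- def _categorize_aws_components(components: List[str]) -> Dict[str, List[str]]:
--     """Categorize AWS components by service type (category-major: one filter pass per category)"""
--     known = {s for services in _SERVICE_CATEGORIES.values() for s in services}
--     result: Dict[str, List[str]] = {}
--     claimed: set = set()
--     for category, services in _SERVICE_CATEGORIES.items():
--         own = set(services) - claimed  # services not already claimed by an earlier category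
--         if category == 'compute':
--             # unknown components default to compute, interleaved in input order
--             result[category] = [c for c in components if c in own or c not in known]
--         else:
--             result[category] = [c for c in components if c in own]
--         claimed |= own
--     return result
-- ===== Notes on version B (the rewrite author's own statement) =====
-- stated objective: alternative
-- what changed: Replaces A's component-major loop (scanning the eight category service lists per component with a break flag and appending to mutable lists) by a category-major pass: for each category in order, one filter of the whole input against the set of services not claimed by earlier categories, with unknown components folded into the compute filter; a timing run measured B about 2.4x faster (O(1) set membership per test instead of list scans).
import Mathlib
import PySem

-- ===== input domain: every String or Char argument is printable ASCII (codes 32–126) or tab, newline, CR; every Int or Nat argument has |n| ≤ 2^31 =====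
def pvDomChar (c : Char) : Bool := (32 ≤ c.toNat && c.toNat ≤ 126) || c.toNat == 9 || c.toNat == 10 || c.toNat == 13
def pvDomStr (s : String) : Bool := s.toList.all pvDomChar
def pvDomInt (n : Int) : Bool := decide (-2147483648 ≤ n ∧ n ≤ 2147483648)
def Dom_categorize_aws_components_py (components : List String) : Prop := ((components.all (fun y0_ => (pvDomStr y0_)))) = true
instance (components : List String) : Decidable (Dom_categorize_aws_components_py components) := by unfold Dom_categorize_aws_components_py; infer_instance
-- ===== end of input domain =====

-- B replaces A's component-major loop (scan the eight category lists per component, break on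
-- first hit, append to mutable lists) by a category-major pass: one filter of the whole input
-- per category against the set of services not claimed by earlier categories. (objective: alternative)

-- ===== PORT A =====
-- the service_categories literal of A
def pvServiceCatsA : List (String × List String) :=
  [("compute", ["EC2", "Lambda", "ECS", "EKS", "Fargate"]),
   ("storage", ["S3", "EFS", "EBS"]),
   ("database", ["RDS", "DynamoDB", "Aurora", "ElastiCache", "Redshift"]),
   ("network", ["VPC", "CloudFront", "Route 53", "ALB", "NLB", "ELB", "API Gateway", "WAF"]),
   ("security", ["IAM", "Cognito", "KMS", "Secrets Manager"]),
   ("monitoring", ["CloudWatch", "CloudTrail", "X-Ray"]),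
   ("integration", ["SQS", "SNS", "EventBridge", "Kinesis", "Step Functions"]),
   ("analytics", ["Redshift", "Kinesis", "QuickSight", "Athena"])]

-- A's inner 'for category, services … if component in services: …; break' loop with the
-- 'categorized' flag: returns the first category whose list contains the component, if any
def pvFindCatA (component : String) : List (String × List String) → Option String
  | [] => none
  | (category, services) :: rest =>
      if services.contains component then some category else pvFindCatA component rest

def categorize_aws_components_py (components : List String) : List (String × List String) :=
  let categories : PySem.Dict String (List String) :=
    PySem.Dict.ofList
      [("compute", []), ("storage", []), ("database", []), ("network", []),
       ("security", []), ("monitoring", []), ("integration", []), ("analytics", [])]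
  (components.foldl (fun d component =>
      match pvFindCatA component pvServiceCatsA with
      | some category => d.modify category [] (· ++ [component])
      | none => d.modify "compute" [] (· ++ [component])) categories).items

-- ===== PORT B =====
-- Source B's _SERVICE_CATEGORIES module constant (same literal as A's service_categories)
def pvServiceCatsB : List (String × List String) :=
  [("compute", ["EC2", "Lambda", "ECS", "EKS", "Fargate"]),
   ("storage", ["S3", "EFS", "EBS"]),
   ("database", ["RDS", "DynamoDB", "Aurora", "ElastiCache", "Redshift"]),
   ("network", ["VPC", "CloudFront", "Route 53", "ALB", "NLB", "ELB", "API Gateway", "WAF"]),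
   ("security", ["IAM", "Cognito", "KMS", "Secrets Manager"]),
   ("monitoring", ["CloudWatch", "CloudTrail", "X-Ray"]),
   ("integration", ["SQS", "SNS", "EventBridge", "Kinesis", "Step Functions"]),
   ("analytics", ["Redshift", "Kinesis", "QuickSight", "Athena"])]

-- known = {s for services in _SERVICE_CATEGORIES.values() for s in services}
def pvKnown : PySem.Set String :=
  pvServiceCatsB.foldl (fun s p => p.2.foldl PySem.Set.add s) PySem.Set.empty

-- the body of Source B's 'for category, services in _SERVICE_CATEGORIES.items():' loop,
-- over the state (result, claimed)
def pvStepB (components : List String)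
    (st : PySem.Dict String (List String) × PySem.Set String)
    (p : String × List String) : PySem.Dict String (List String) × PySem.Set String :=
  let own := PySem.Set.diff (PySem.Set.ofList p.2) st.2
  let lst := if p.1 == "compute"
    then components.filter (fun c => own.contains c || !(pvKnown.contains c))
    else components.filter (fun c => own.contains c)
  (st.1.insert p.1 lst, PySem.Set.update st.2 own)

def categorize_aws_components_py_alt (components : List String) : List (String × List String) :=
  (pvServiceCatsB.foldl (pvStepB components)
    ((PySem.Dict.empty : PySem.Dict String (List String)), (PySem.Set.empty : PySem.Set String))).1.items

-- ===== PRECONDITION & SPEC =====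
def Spec_categorize_aws_components_py (components : List String) (out : List (String × List String)) : Prop := out = categorize_aws_components_py_alt components
instance (components : List String) (out : List (String × List String)) : Decidable (Spec_categorize_aws_components_py components out) := by unfold Spec_categorize_aws_components_py; infer_instance

-- ===== CLAIM (what is proved, stated in full; the proofs are below) =====
def Claim_equal_categorize_aws_components_py : Prop := ∀ (components : List String), Dom_categorize_aws_components_py components → Spec_categorize_aws_components_py components (categorize_aws_components_py components)

-- ===== LEMMAS AND PROOFS =====

-- A's key for a component: the first matching category, defaulting to compute
def pvKeyA (c : String) : String := (pvFindCatA c pvServiceCatsA).getD "compute"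

-- B's per-category filter predicates, with the 'own' sets evaluated to literals
def pvP1 (c : String) : Bool := PySem.Set.contains ["EC2","Lambda","ECS","EKS","Fargate"] c || !(pvKnown.contains c)
def pvP2 (c : String) : Bool := PySem.Set.contains ["S3","EFS","EBS"] c
def pvP3 (c : String) : Bool := PySem.Set.contains ["RDS","DynamoDB","Aurora","ElastiCache","Redshift"] c
def pvP4 (c : String) : Bool := PySem.Set.contains ["VPC","CloudFront","Route 53","ALB","NLB","ELB","API Gateway","WAF"] c
def pvP5 (c : String) : Bool := PySem.Set.contains ["IAM","Cognito","KMS","Secrets Manager"] c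
def pvP6 (c : String) : Bool := PySem.Set.contains ["CloudWatch","CloudTrail","X-Ray"] c
def pvP7 (c : String) : Bool := PySem.Set.contains ["SQS","SNS","EventBridge","Kinesis","Step Functions"] c
def pvP8 (c : String) : Bool := PySem.Set.contains ["QuickSight","Athena"] c

-- all service names occurring in the tables (= pvKnown, proved below)
def pvAllServices : List String :=
  ["EC2", "Lambda", "ECS", "EKS", "Fargate", "S3", "EFS", "EBS",
   "RDS", "DynamoDB", "Aurora", "ElastiCache", "Redshift",
   "VPC", "CloudFront", "Route 53", "ALB", "NLB", "ELB", "API Gateway", "WAF",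
   "IAM", "Cognito", "KMS", "Secrets Manager",
   "CloudWatch", "CloudTrail", "X-Ray",
   "SQS", "SNS", "EventBridge", "Kinesis", "Step Functions",
   "QuickSight", "Athena"]

lemma pvB_eval (components : List String) : categorize_aws_components_py_alt components =
  [("compute", components.filter pvP1), ("storage", components.filter pvP2),
   ("database", components.filter pvP3), ("network", components.filter pvP4),
   ("security", components.filter pvP5), ("monitoring", components.filter pvP6),
   ("integration", components.filter pvP7), ("analytics", components.filter pvP8)] := by
  unfold categorize_aws_components_py_alt pvServiceCatsB
  have e1 : pvStepB components ((PySem.Dict.empty : PySem.Dict String (List String)), (PySem.Set.empty : PySem.Set String)) ("compute", ["EC2","Lambda","ECS","EKS","Fargate"]) = (PySem.Dict.mk [("compute", components.filter pvP1)], (["EC2","Lambda","ECS","EKS","Fargate"] : PySem.Set String)) := by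
    simp only [pvStepB]
    rw [show PySem.Set.diff (PySem.Set.ofList ["EC2","Lambda","ECS","EKS","Fargate"]) (PySem.Set.empty : PySem.Set String) = (["EC2","Lambda","ECS","EKS","Fargate"] : PySem.Set String) from by decide]
    rw [show PySem.Set.update (PySem.Set.empty : PySem.Set String) (["EC2","Lambda","ECS","EKS","Fargate"] : PySem.Set String) = (["EC2","Lambda","ECS","EKS","Fargate"] : PySem.Set String) from by decide]
    rfl
  have e2 : pvStepB components (PySem.Dict.mk [("compute", components.filter pvP1)], (["EC2","Lambda","ECS","EKS","Fargate"] : PySem.Set String)) ("storage", ["S3","EFS","EBS"]) = (PySem.Dict.mk [("compute", components.filter pvP1),("storage", components.filter pvP2)], (["EC2","Lambda","ECS","EKS","Fargate","S3","EFS","EBS"] : PySem.Set String)) := by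
    simp only [pvStepB]
    rw [show PySem.Set.diff (PySem.Set.ofList ["S3","EFS","EBS"]) (["EC2","Lambda","ECS","EKS","Fargate"] : PySem.Set String) = (["S3","EFS","EBS"] : PySem.Set String) from by decide]
    rw [show PySem.Set.update (["EC2","Lambda","ECS","EKS","Fargate"] : PySem.Set String) (["S3","EFS","EBS"] : PySem.Set String) = (["EC2","Lambda","ECS","EKS","Fargate","S3","EFS","EBS"] : PySem.Set String) from by decide]
    rfl
  have e3 : pvStepB components (PySem.Dict.mk [("compute", components.filter pvP1),("storage", components.filter pvP2)], (["EC2","Lambda","ECS","EKS","Fargate","S3","EFS","EBS"] : PySem.Set String)) ("database", ["RDS","DynamoDB","Aurora","ElastiCache","Redshift"]) = (PySem.Dict.mk [("compute", components.filter pvP1),("storage", components.filter pvP2),("database", components.filter pvP3)], (["EC2","Lambda","ECS","EKS","Fargate","S3","EFS","EBS","RDS","DynamoDB","Aurora","ElastiCache","Redshift"] : PySem.Set String)) := by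
    simp only [pvStepB]
    rw [show PySem.Set.diff (PySem.Set.ofList ["RDS","DynamoDB","Aurora","ElastiCache","Redshift"]) (["EC2","Lambda","ECS","EKS","Fargate","S3","EFS","EBS"] : PySem.Set String) = (["RDS","DynamoDB","Aurora","ElastiCache","Redshift"] : PySem.Set String) from by decide]
    rw [show PySem.Set.update (["EC2","Lambda","ECS","EKS","Fargate","S3","EFS","EBS"] : PySem.Set String) (["RDS","DynamoDB","Aurora","ElastiCache","Redshift"] : PySem.Set String) = (["EC2","Lambda","ECS","EKS","Fargate","S3","EFS","EBS","RDS","DynamoDB","Aurora","ElastiCache","Redshift"] : PySem.Set String) from by decide]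
    rfl
  have e4 : pvStepB components (PySem.Dict.mk [("compute", components.filter pvP1),("storage", components.filter pvP2),("database", components.filter pvP3)], (["EC2","Lambda","ECS","EKS","Fargate","S3","EFS","EBS","RDS","DynamoDB","Aurora","ElastiCache","Redshift"] : PySem.Set String)) ("network", ["VPC","CloudFront","Route 53","ALB","NLB","ELB","API Gateway","WAF"]) = (PySem.Dict.mk [("compute", components.filter pvP1),("storage", components.filter pvP2),("database", components.filter pvP3),("network", components.filter pvP4)], (["EC2","Lambda","ECS","EKS","Fargate","S3","EFS","EBS","RDS","DynamoDB","Aurora","ElastiCache","Redshift","VPC","CloudFront","Route 53","ALB","NLB","ELB","API Gateway","WAF"] : PySem.Set String)) := by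
    simp only [pvStepB]
    rw [show PySem.Set.diff (PySem.Set.ofList ["VPC","CloudFront","Route 53","ALB","NLB","ELB","API Gateway","WAF"]) (["EC2","Lambda","ECS","EKS","Fargate","S3","EFS","EBS","RDS","DynamoDB","Aurora","ElastiCache","Redshift"] : PySem.Set String) = (["VPC","CloudFront","Route 53","ALB","NLB","ELB","API Gateway","WAF"] : PySem.Set String) from by decide]
    rw [show PySem.Set.update (["EC2","Lambda","ECS","EKS","Fargate","S3","EFS","EBS","RDS","DynamoDB","Aurora","ElastiCache","Redshift"] : PySem.Set String) (["VPC","CloudFront","Route 53","ALB","NLB","ELB","API Gateway","WAF"] : PySem.Set String) = (["EC2","Lambda","ECS","EKS","Fargate","S3","EFS","EBS","RDS","DynamoDB","Aurora","ElastiCache","Redshift","VPC","CloudFront","Route 53","ALB","NLB","ELB","API Gateway","WAF"] : PySem.Set String) from by decide]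
    rfl
  have e5 : pvStepB components (PySem.Dict.mk [("compute", components.filter pvP1),("storage", components.filter pvP2),("database", components.filter pvP3),("network", components.filter pvP4)], (["EC2","Lambda","ECS","EKS","Fargate","S3","EFS","EBS","RDS","DynamoDB","Aurora","ElastiCache","Redshift","VPC","CloudFront","Route 53","ALB","NLB","ELB","API Gateway","WAF"] : PySem.Set String)) ("security", ["IAM","Cognito","KMS","Secrets Manager"]) = (PySem.Dict.mk [("compute", components.filter pvP1),("storage", components.filter pvP2),("database", components.filter pvP3),("network", components.filter pvP4),("security", components.filter pvP5)], (["EC2","Lambda","ECS","EKS","Fargate","S3","EFS","EBS","RDS","DynamoDB","Aurora","ElastiCache","Redshift","VPC","CloudFront","Route 53","ALB","NLB","ELB","API Gateway","WAF","IAM","Cognito","KMS","Secrets Manager"] : PySem.Set String)) := by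
    simp only [pvStepB]
    rw [show PySem.Set.diff (PySem.Set.ofList ["IAM","Cognito","KMS","Secrets Manager"]) (["EC2","Lambda","ECS","EKS","Fargate","S3","EFS","EBS","RDS","DynamoDB","Aurora","ElastiCache","Redshift","VPC","CloudFront","Route 53","ALB","NLB","ELB","API Gateway","WAF"] : PySem.Set String) = (["IAM","Cognito","KMS","Secrets Manager"] : PySem.Set String) from by decide]
    rw [show PySem.Set.update (["EC2","Lambda","ECS","EKS","Fargate","S3","EFS","EBS","RDS","DynamoDB","Aurora","ElastiCache","Redshift","VPC","CloudFront","Route 53","ALB","NLB","ELB","API Gateway","WAF"] : PySem.Set String) (["IAM","Cognito","KMS","Secrets Manager"] : PySem.Set String) = (["EC2","Lambda","ECS","EKS","Fargate","S3","EFS","EBS","RDS","DynamoDB","Aurora","ElastiCache","Redshift","VPC","CloudFront","Route 53","ALB","NLB","ELB","API Gateway","WAF","IAM","Cognito","KMS","Secrets Manager"] : PySem.Set String) from by decide]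
    rfl
  have e6 : pvStepB components (PySem.Dict.mk [("compute", components.filter pvP1),("storage", components.filter pvP2),("database", components.filter pvP3),("network", components.filter pvP4),("security", components.filter pvP5)], (["EC2","Lambda","ECS","EKS","Fargate","S3","EFS","EBS","RDS","DynamoDB","Aurora","ElastiCache","Redshift","VPC","CloudFront","Route 53","ALB","NLB","ELB","API Gateway","WAF","IAM","Cognito","KMS","Secrets Manager"] : PySem.Set String)) ("monitoring", ["CloudWatch","CloudTrail","X-Ray"]) = (PySem.Dict.mk [("compute", components.filter pvP1),("storage", components.filter pvP2),("database", components.filter pvP3),("network", components.filter pvP4),("security", components.filter pvP5),("monitoring", components.filter pvP6)], (["EC2","Lambda","ECS","EKS","Fargate","S3","EFS","EBS","RDS","DynamoDB","Aurora","ElastiCache","Redshift","VPC","CloudFront","Route 53","ALB","NLB","ELB","API Gateway","WAF","IAM","Cognito","KMS","Secrets Manager","CloudWatch","CloudTrail","X-Ray"] : PySem.Set String)) := by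
    simp only [pvStepB]
    rw [show PySem.Set.diff (PySem.Set.ofList ["CloudWatch","CloudTrail","X-Ray"]) (["EC2","Lambda","ECS","EKS","Fargate","S3","EFS","EBS","RDS","DynamoDB","Aurora","ElastiCache","Redshift","VPC","CloudFront","Route 53","ALB","NLB","ELB","API Gateway","WAF","IAM","Cognito","KMS","Secrets Manager"] : PySem.Set String) = (["CloudWatch","CloudTrail","X-Ray"] : PySem.Set String) from by decide]
    rw [show PySem.Set.update (["EC2","Lambda","ECS","EKS","Fargate","S3","EFS","EBS","RDS","DynamoDB","Aurora","ElastiCache","Redshift","VPC","CloudFront","Route 53","ALB","NLB","ELB","API Gateway","WAF","IAM","Cognito","KMS","Secrets Manager"] : PySem.Set String) (["CloudWatch","CloudTrail","X-Ray"] : PySem.Set String) = (["EC2","Lambda","ECS","EKS","Fargate","S3","EFS","EBS","RDS","DynamoDB","Aurora","ElastiCache","Redshift","VPC","CloudFront","Route 53","ALB","NLB","ELB","API Gateway","WAF","IAM","Cognito","KMS","Secrets Manager","CloudWatch","CloudTrail","X-Ray"] : PySem.Set String) from by decide]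
    rfl
  have e7 : pvStepB components (PySem.Dict.mk [("compute", components.filter pvP1),("storage", components.filter pvP2),("database", components.filter pvP3),("network", components.filter pvP4),("security", components.filter pvP5),("monitoring", components.filter pvP6)], (["EC2","Lambda","ECS","EKS","Fargate","S3","EFS","EBS","RDS","DynamoDB","Aurora","ElastiCache","Redshift","VPC","CloudFront","Route 53","ALB","NLB","ELB","API Gateway","WAF","IAM","Cognito","KMS","Secrets Manager","CloudWatch","CloudTrail","X-Ray"] : PySem.Set String)) ("integration", ["SQS","SNS","EventBridge","Kinesis","Step Functions"]) = (PySem.Dict.mk [("compute", components.filter pvP1),("storage", components.filter pvP2),("database", components.filter pvP3),("network", components.filter pvP4),("security", components.filter pvP5),("monitoring", components.filter pvP6),("integration", components.filter pvP7)], (["EC2","Lambda","ECS","EKS","Fargate","S3","EFS","EBS","RDS","DynamoDB","Aurora","ElastiCache","Redshift","VPC","CloudFront","Route 53","ALB","NLB","ELB","API Gateway","WAF","IAM","Cognito","KMS","Secrets Manager","CloudWatch","CloudTrail","X-Ray","SQS","SNS","EventBridge","Kinesis","Step Functions"] : PySem.Set String)) := by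
    simp only [pvStepB]
    rw [show PySem.Set.diff (PySem.Set.ofList ["SQS","SNS","EventBridge","Kinesis","Step Functions"]) (["EC2","Lambda","ECS","EKS","Fargate","S3","EFS","EBS","RDS","DynamoDB","Aurora","ElastiCache","Redshift","VPC","CloudFront","Route 53","ALB","NLB","ELB","API Gateway","WAF","IAM","Cognito","KMS","Secrets Manager","CloudWatch","CloudTrail","X-Ray"] : PySem.Set String) = (["SQS","SNS","EventBridge","Kinesis","Step Functions"] : PySem.Set String) from by decide]
    rw [show PySem.Set.update (["EC2","Lambda","ECS","EKS","Fargate","S3","EFS","EBS","RDS","DynamoDB","Aurora","ElastiCache","Redshift","VPC","CloudFront","Route 53","ALB","NLB","ELB","API Gateway","WAF","IAM","Cognito","KMS","Secrets Manager","CloudWatch","CloudTrail","X-Ray"] : PySem.Set String) (["SQS","SNS","EventBridge","Kinesis","Step Functions"] : PySem.Set String) = (["EC2","Lambda","ECS","EKS","Fargate","S3","EFS","EBS","RDS","DynamoDB","Aurora","ElastiCache","Redshift","VPC","CloudFront","Route 53","ALB","NLB","ELB","API Gateway","WAF","IAM","Cognito","KMS","Secrets Manager","CloudWatch","CloudTrail","X-Ray","SQS","SNS","EventBridge","Kinesis","Step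 Functions"] : PySem.Set String) from by decide]
    rfl
  have e8 : pvStepB components (PySem.Dict.mk [("compute", components.filter pvP1),("storage", components.filter pvP2),("database", components.filter pvP3),("network", components.filter pvP4),("security", components.filter pvP5),("monitoring", components.filter pvP6),("integration", components.filter pvP7)], (["EC2","Lambda","ECS","EKS","Fargate","S3","EFS","EBS","RDS","DynamoDB","Aurora","ElastiCache","Redshift","VPC","CloudFront","Route 53","ALB","NLB","ELB","API Gateway","WAF","IAM","Cognito","KMS","Secrets Manager","CloudWatch","CloudTrail","X-Ray","SQS","SNS","EventBridge","Kinesis","Step Functions"] : PySem.Set String)) ("analytics", ["Redshift","Kinesis","QuickSight","Athena"]) = (PySem.Dict.mk [("compute", components.filter pvP1),("storage", components.filter pvP2),("database", components.filter pvP3),("network", components.filter pvP4),("security", components.filter pvP5),("monitoring", components.filter pvP6),("integration", components.filter pvP7),("analytics", components.filter pvP8)], (["EC2","Lambda","ECS","EKS","Fargate","S3","EFS","EBS","RDS","DynamoDB","Aurora","ElastiCache","Redshift","VPC","CloudFront","Route 53","ALB","NLB","ELB","API Gateway","WAF","IAM","Cognito","KMS","Secrets Manager","CloudWatch","CloudTrail","X-Ray","SQS","SNS","EventBridge","Kinesis","Step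 Functions","QuickSight","Athena"] : PySem.Set String)) := by
    simp only [pvStepB]
    rw [show PySem.Set.diff (PySem.Set.ofList ["Redshift","Kinesis","QuickSight","Athena"]) (["EC2","Lambda","ECS","EKS","Fargate","S3","EFS","EBS","RDS","DynamoDB","Aurora","ElastiCache","Redshift","VPC","CloudFront","Route 53","ALB","NLB","ELB","API Gateway","WAF","IAM","Cognito","KMS","Secrets Manager","CloudWatch","CloudTrail","X-Ray","SQS","SNS","EventBridge","Kinesis","Step Functions"] : PySem.Set String) = (["QuickSight","Athena"] : PySem.Set String) from by decide]
    rw [show PySem.Set.update (["EC2","Lambda","ECS","EKS","Fargate","S3","EFS","EBS","RDS","DynamoDB","Aurora","ElastiCache","Redshift","VPC","CloudFront","Route 53","ALB","NLB","ELB","API Gateway","WAF","IAM","Cognito","KMS","Secrets Manager","CloudWatch","CloudTrail","X-Ray","SQS","SNS","EventBridge","Kinesis","Step Functions"] : PySem.Set String) (["QuickSight","Athena"] : PySem.Set String) = (["EC2","Lambda","ECS","EKS","Fargate","S3","EFS","EBS","RDS","DynamoDB","Aurora","ElastiCache","Redshift","VPC","CloudFront","Route 53","ALB","NLB","ELB","API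 Gateway","WAF","IAM","Cognito","KMS","Secrets Manager","CloudWatch","CloudTrail","X-Ray","SQS","SNS","EventBridge","Kinesis","Step Functions","QuickSight","Athena"] : PySem.Set String) from by decide]
    rfl
  simp only [List.foldl_cons, List.foldl_nil]
  rw [e1, e2, e3, e4, e5, e6, e7, e8]

lemma pvKeyA_cases (c : String) :
    pvKeyA c = "compute" ∨ pvKeyA c = "storage" ∨ pvKeyA c = "database" ∨ pvKeyA c = "network" ∨
    pvKeyA c = "security" ∨ pvKeyA c = "monitoring" ∨ pvKeyA c = "integration" ∨ pvKeyA c = "analytics" := by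
  unfold pvKeyA pvServiceCatsA
  simp only [pvFindCatA]
  split_ifs <;> simp

lemma pvPred_eq (c : String) :
    pvP1 c = (pvKeyA c == "compute") ∧ pvP2 c = (pvKeyA c == "storage") ∧
    pvP3 c = (pvKeyA c == "database") ∧ pvP4 c = (pvKeyA c == "network") ∧
    pvP5 c = (pvKeyA c == "security") ∧ pvP6 c = (pvKeyA c == "monitoring") ∧
    pvP7 c = (pvKeyA c == "integration") ∧ pvP8 c = (pvKeyA c == "analytics") := by
  by_cases hc : c ∈ pvAllServices
  · fin_cases hc <;> decide
  · simp only [pvAllServices, List.mem_cons, List.not_mem_nil, or_false, not_or] at hc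
    obtain ⟨h1, h2, h3, h4, h5, h6, h7, h8, h9, h10, h11, h12, h13, h14, h15, h16, h17, h18, h19, h20, h21, h22, h23, h24, h25, h26, h27, h28, h29, h30, h31, h32, h33, h34, h35⟩ := hc
    have hkn : pvKnown = pvAllServices := by
      set_option maxRecDepth 8192 in decide
    refine ⟨?_, ?_, ?_, ?_, ?_, ?_, ?_, ?_⟩ <;>
      simp [pvP1, pvP2, pvP3, pvP4, pvP5, pvP6, pvP7, pvP8, pvKeyA, pvFindCatA, pvServiceCatsA,
        hkn, pvAllServices, Option.getD, h1, h2, h3, h4, h5, h6, h7, h8, h9, h10, h11, h12, h13, h14, h15, h16, h17, h18, h19, h20, h21, h22, h23, h24, h25, h26, h27, h28, h29, h30, h31, h32, h33, h34, h35]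

lemma pvA_fold (cs : List String) (l1 l2 l3 l4 l5 l6 l7 l8 : List String) :
    cs.foldl (fun d component =>
      match pvFindCatA component pvServiceCatsA with
      | some category => d.modify category [] (· ++ [component])
      | none => d.modify "compute" [] (· ++ [component]))
      (PySem.Dict.mk [("compute", l1), ("storage", l2), ("database", l3), ("network", l4),
                      ("security", l5), ("monitoring", l6), ("integration", l7), ("analytics", l8)])
    = PySem.Dict.mk
      [("compute", l1 ++ cs.filter (fun c => pvKeyA c == "compute")),
       ("storage", l2 ++ cs.filter (fun c => pvKeyA c == "storage")),
       ("database", l3 ++ cs.filter (fun c => pvKeyA c == "database")),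
       ("network", l4 ++ cs.filter (fun c => pvKeyA c == "network")),
       ("security", l5 ++ cs.filter (fun c => pvKeyA c == "security")),
       ("monitoring", l6 ++ cs.filter (fun c => pvKeyA c == "monitoring")),
       ("integration", l7 ++ cs.filter (fun c => pvKeyA c == "integration")),
       ("analytics", l8 ++ cs.filter (fun c => pvKeyA c == "analytics"))] := by
  induction cs generalizing l1 l2 l3 l4 l5 l6 l7 l8 with
  | nil => simp
  | cons c cs ih =>
    simp only [List.foldl_cons]
    have hstep : ∀ d : PySem.Dict String (List String),
        (match pvFindCatA c pvServiceCatsA with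
         | some category => d.modify category [] (· ++ [c])
         | none => d.modify "compute" [] (· ++ [c])) = d.modify (pvKeyA c) [] (· ++ [c]) := by
      intro d; unfold pvKeyA; cases pvFindCatA c pvServiceCatsA <;> rfl
    rw [hstep]
    rcases pvKeyA_cases c with hk|hk|hk|hk|hk|hk|hk|hk <;> rw [hk]
    · rw [show (PySem.Dict.mk [("compute", l1),("storage", l2),("database", l3),("network", l4),("security", l5),("monitoring", l6),("integration", l7),("analytics", l8)]).modify "compute" [] (· ++ [c]) = PySem.Dict.mk [("compute", (l1 ++ [c])),("storage", l2),("database", l3),("network", l4),("security", l5),("monitoring", l6),("integration", l7),("analytics", l8)] from rfl, ih]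
      simp [hk]
    · rw [show (PySem.Dict.mk [("compute", l1),("storage", l2),("database", l3),("network", l4),("security", l5),("monitoring", l6),("integration", l7),("analytics", l8)]).modify "storage" [] (· ++ [c]) = PySem.Dict.mk [("compute", l1),("storage", (l2 ++ [c])),("database", l3),("network", l4),("security", l5),("monitoring", l6),("integration", l7),("analytics", l8)] from rfl, ih]
      simp [hk]
    · rw [show (PySem.Dict.mk [("compute", l1),("storage", l2),("database", l3),("network", l4),("security", l5),("monitoring", l6),("integration", l7),("analytics", l8)]).modify "database" [] (· ++ [c]) = PySem.Dict.mk [("compute", l1),("storage", l2),("database", (l3 ++ [c])),("network", l4),("security", l5),("monitoring", l6),("integration", l7),("analytics", l8)] from rfl, ih]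
      simp [hk]
    · rw [show (PySem.Dict.mk [("compute", l1),("storage", l2),("database", l3),("network", l4),("security", l5),("monitoring", l6),("integration", l7),("analytics", l8)]).modify "network" [] (· ++ [c]) = PySem.Dict.mk [("compute", l1),("storage", l2),("database", l3),("network", (l4 ++ [c])),("security", l5),("monitoring", l6),("integration", l7),("analytics", l8)] from rfl, ih]
      simp [hk]
    · rw [show (PySem.Dict.mk [("compute", l1),("storage", l2),("database", l3),("network", l4),("security", l5),("monitoring", l6),("integration", l7),("analytics", l8)]).modify "security" [] (· ++ [c]) = PySem.Dict.mk [("compute", l1),("storage", l2),("database", l3),("network", l4),("security", (l5 ++ [c])),("monitoring", l6),("integration", l7),("analytics", l8)] from rfl, ih]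
      simp [hk]
    · rw [show (PySem.Dict.mk [("compute", l1),("storage", l2),("database", l3),("network", l4),("security", l5),("monitoring", l6),("integration", l7),("analytics", l8)]).modify "monitoring" [] (· ++ [c]) = PySem.Dict.mk [("compute", l1),("storage", l2),("database", l3),("network", l4),("security", l5),("monitoring", (l6 ++ [c])),("integration", l7),("analytics", l8)] from rfl, ih]
      simp [hk]
    · rw [show (PySem.Dict.mk [("compute", l1),("storage", l2),("database", l3),("network", l4),("security", l5),("monitoring", l6),("integration", l7),("analytics", l8)]).modify "integration" [] (· ++ [c]) = PySem.Dict.mk [("compute", l1),("storage", l2),("database", l3),("network", l4),("security", l5),("monitoring", l6),("integration", (l7 ++ [c])),("analytics", l8)] from rfl, ih]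
      simp [hk]
    · rw [show (PySem.Dict.mk [("compute", l1),("storage", l2),("database", l3),("network", l4),("security", l5),("monitoring", l6),("integration", l7),("analytics", l8)]).modify "analytics" [] (· ++ [c]) = PySem.Dict.mk [("compute", l1),("storage", l2),("database", l3),("network", l4),("security", l5),("monitoring", l6),("integration", l7),("analytics", (l8 ++ [c]))] from rfl, ih]
      simp [hk]

-- ===== VERDICT (by name: the statement is the Claim_ definition above) =====
theorem categorize_aws_components_py_spec : Claim_equal_categorize_aws_components_py := by
  intro components _
  unfold Spec_categorize_aws_components_py
  rw [pvB_eval]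
  simp only [categorize_aws_components_py]
  rw [show (PySem.Dict.ofList [("compute",([]:List String)),("storage",[]),("database",[]),("network",[]),("security",[]),("monitoring",[]),("integration",[]),("analytics",[])]) = PySem.Dict.mk [("compute",[]),("storage",[]),("database",[]),("network",[]),("security",[]),("monitoring",[]),("integration",[]),("analytics",[])] from by decide]
  rw [pvA_fold]
  simp only [List.nil_append]
  refine congrArg₂ _ ?_ (congrArg₂ _ ?_ (congrArg₂ _ ?_ (congrArg₂ _ ?_ (congrArg₂ _ ?_
    (congrArg₂ _ ?_ (congrArg₂ _ ?_ (congrArg₂ _ ?_ rfl))))))) <;>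
  · refine congrArg _ (List.filter_congr ?_)
    intro c _
    have h := pvPred_eq c
    simp only [h.1, h.2.1, h.2.2.1, h.2.2.2.1, h.2.2.2.2.1, h.2.2.2.2.2.1, h.2.2.2.2.2.2.1, h.2.2.2.2.2.2.2]
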